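-- pv_equiv track=rewrite | github.com/ysjzy123/GrokSearch | src/grok_search/server.py | _apply_source_order
-- ===== SOURCE A (Python) =====
-- def _apply_source_order(sources: list[dict], order: list[int]) -> list[dict]:
--     if not sources:
--         return []
--
--     ordered: list[dict] = []
--     seen: set[int] = set()
--     for index in order:
--         zero_based = index - 1
--         if 0 <= zero_based < len(sources) and zero_based not in seen:
--             ordered.append(sources[zero_based])
--             seen.add(zero_based)
--
--     for index, source in enumerate(sources):
--         if index not in seen:
--             ordered.append(source)
--
--     return ordered
-- ===== SOURCE B (Python) =====
-- def _apply_source_order(sources: list[dict], order: list[int]) -> list[dict]: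
--     # Rank-and-sort: give every source index the position of its first valid
--     # mention in `order` (unmentioned indices rank past the end, in index
--     # order), then sort the indices by rank and materialize once.
--     pos = {}
--     for j, v in enumerate(order):
--         pos.setdefault(v - 1, j)
--     m = len(order)
--     keys = sorted(range(len(sources)), key=lambda i: pos.get(i, m + i))
--     return [sources[i] for i in keys]
-- ===== Notes on version B (the rewrite author's own statement) =====
-- stated objective: alternative
-- what changed: B replaces A's two incremental append loops with a seen-set by a rank-and-sort algorithm: build a first-mention-position dict over order, assign each source index a rank (first valid mention, or past-the-end in index order) and stably sort the indices by rank, then materialize in one mapping pass.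
import Mathlib
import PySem

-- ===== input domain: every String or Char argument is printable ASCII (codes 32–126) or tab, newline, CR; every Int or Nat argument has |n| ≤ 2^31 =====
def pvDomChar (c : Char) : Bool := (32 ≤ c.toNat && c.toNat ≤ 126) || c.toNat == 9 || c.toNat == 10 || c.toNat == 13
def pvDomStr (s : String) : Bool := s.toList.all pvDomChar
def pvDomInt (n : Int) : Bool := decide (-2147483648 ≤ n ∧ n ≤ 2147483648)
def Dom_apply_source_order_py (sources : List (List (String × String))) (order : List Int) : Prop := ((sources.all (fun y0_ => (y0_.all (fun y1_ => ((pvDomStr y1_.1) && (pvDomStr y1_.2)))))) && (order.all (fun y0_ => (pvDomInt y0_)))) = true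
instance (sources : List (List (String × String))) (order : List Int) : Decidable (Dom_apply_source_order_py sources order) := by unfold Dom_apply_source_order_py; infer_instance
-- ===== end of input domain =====

-- B replaces A's two incremental append loops (seen set + leftovers pass) by rank-and-sort:
-- a first-mention-position dict over `order`, a stable sort of the source indices by rank,
-- and one final mapping pass. Same value, different algorithm.

-- ===== PORT A =====
def apply_source_order_py (sources : List (List (String × String))) (order : List Int) : List (List (String × String)) :=
  if sources = [] then []
  else
    let st := order.foldl
      (fun (st : List (List (String × String)) × PySem.Set Int) index =>
        let zero_based := index - 1
        if 0 ≤ zero_based ∧ zero_based < (sources.length : Int) ∧ PySem.Set.contains st.2 zero_based = false then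
          (st.1 ++ [PySem.List.pyGetD sources zero_based []], PySem.Set.add st.2 zero_based)
        else st)
      ([], PySem.Set.empty)
    (PySem.List.enumerate sources 0).foldl
      (fun ordered p => if PySem.Set.contains st.2 p.1 = false then ordered ++ [p.2] else ordered)
      st.1

-- ===== PORT B =====
def apply_source_order_py_alt (sources : List (List (String × String))) (order : List Int) : List (List (String × String)) :=
  let pos := (PySem.List.enumerate order 0).foldl
    (fun (d : PySem.Dict Int Int) p => d.setdefault (p.2 - 1) p.1) PySem.Dict.empty
  let m : Int := PySem.List.len order
  let keys := PySem.List.sorted (PySem.List.pyRange 0 (PySem.List.len sources) 1)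
    (fun i => pos.getD i (m + i))
  keys.map (fun i => PySem.List.pyGetD sources i [])

-- ===== PRECONDITION & SPEC =====
def Spec_apply_source_order_py (sources : List (List (String × String))) (order : List Int) (out : List (List (String × String))) : Prop := out = apply_source_order_py_alt sources order
instance (sources : List (List (String × String))) (order : List Int) (out : List (List (String × String))) : Decidable (Spec_apply_source_order_py sources order out) := by unfold Spec_apply_source_order_py; infer_instance

-- ===== CLAIM (what is proved, stated in full; the proofs are below) =====
def Claim_equal_apply_source_order_py : Prop := ∀ (sources : List (List (String × String))) (order : List Int), Dom_apply_source_order_py sources order → Spec_apply_source_order_py sources order (apply_source_order_py sources order)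

-- ===== LEMMAS AND PROOFS =====

-- the valid-index filter shared by both characterizations: order entry i ↦ zero-based i-1 when in range
def pvVF (n : Int) : Int → Option Int := fun i => if 0 ≤ i - 1 ∧ i - 1 < n then some (i - 1) else none

-- rank of a value: position of its first occurrence, list length if absent
def pvRnk (l : List Int) (x : Int) : Nat := (PySem.List.index? l x).getD l.length

theorem mem_valid (n : Int) (l : List Int) (a : Int) :
    a ∈ l.filterMap (pvVF n) ↔ (a + 1 ∈ l ∧ 0 ≤ a ∧ a < n) := by
  simp only [List.mem_filterMap, pvVF]
  constructor
  · rintro ⟨x, hx, hfx⟩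
    split_ifs at hfx with hc
    · have hxa' : x - 1 = a := Option.some.inj hfx
      have hxa : x = a + 1 := by omega
      exact ⟨hxa ▸ hx, by omega, by omega⟩
  · rintro ⟨hmem, h0, hn⟩
    exact ⟨a + 1, hmem, by rw [if_pos (by omega)]; congr 1; omega⟩

theorem rnk_cons_self (v : Int) (l : List Int) : pvRnk (v :: l) v = 0 := by
  rw [pvRnk, PySem.List.index?_cons_self]; rfl

theorem rnk_cons_ne (v x : Int) (l : List Int) (h : v ≠ x) :
    pvRnk (v :: l) x = pvRnk l x + 1 := by
  simp only [pvRnk, PySem.List.index?_cons_of_ne l h]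
  cases PySem.List.index? l x <;> simp

-- invariant for A's first loop: the appended dicts are exactly the seen set mapped through indexing
theorem loop1_invariant (sources : List (List (String × String))) (order : List Int)
    (s : PySem.Set Int) :
    order.foldl
      (fun (st : List (List (String × String)) × PySem.Set Int) index =>
        let zero_based := index - 1
        if 0 ≤ zero_based ∧ zero_based < (sources.length : Int) ∧ PySem.Set.contains st.2 zero_based = false then
          (st.1 ++ [PySem.List.pyGetD sources zero_based []], PySem.Set.add st.2 zero_based)
        else st)
      (s.map (fun i => PySem.List.pyGetD sources i []), s)
    = (((order.filterMap (pvVF (sources.length : Int))).foldl PySem.Set.add s).map (fun i => PySem.List.pyGetD sources i []),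
       (order.filterMap (pvVF (sources.length : Int))).foldl PySem.Set.add s) := by
  induction order generalizing s with
  | nil => simp
  | cons i rest ih =>
    by_cases hv : 0 ≤ i - 1 ∧ i - 1 < (sources.length : Int)
    · by_cases hc : PySem.Set.contains s (i - 1) = false
      · have hmem : (i - 1) ∉ s := by
          simpa [PySem.Set.contains] using hc
        have hadd : PySem.Set.add s (i - 1) = s ++ [i - 1] := by
          simp [PySem.Set.add, PySem.Set.contains, hmem]
        have hm : (PySem.Set.add s (i - 1)).map (fun i => PySem.List.pyGetD sources i [])
            = s.map (fun i => PySem.List.pyGetD sources i []) ++ [PySem.List.pyGetD sources (i - 1) []] := by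
          rw [hadd]; simp
        simp only [List.foldl_cons, List.filterMap_cons, pvVF, if_pos hv]
        rw [if_pos ⟨hv.1, hv.2, hc⟩]
        rw [← hm]
        exact ih (PySem.Set.add s (i - 1))
      · have hmem : (i - 1) ∈ s := by
          simpa [PySem.Set.contains] using hc
        have hadd : PySem.Set.add s (i - 1) = s := by
          simp [PySem.Set.add, PySem.Set.contains, hmem]
        simp only [List.foldl_cons, List.filterMap_cons, pvVF, if_pos hv]
        rw [if_neg (fun h => hc h.2.2), hadd]
        exact ih s
    · simp only [List.foldl_cons, List.filterMap_cons, pvVF, if_neg hv]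
      rw [if_neg (fun h => hv ⟨h.1, h.2.1⟩)]
      exact ih s

-- A in canonical form: deduped valid indices, then the untouched range indices, mapped once
theorem A_canon (sources : List (List (String × String))) (order : List Int) :
    apply_source_order_py sources order =
      (PySem.List.dedup (order.filterMap (pvVF (sources.length : Int))) ++
        (PySem.List.pyRange 0 (sources.length : Int)).filter
          (fun i => !PySem.Set.contains
            (PySem.Set.ofList (PySem.List.dedup (order.filterMap (pvVF (sources.length : Int))))) i)).map
        (fun i => PySem.List.pyGetD sources i []) := by
  unfold apply_source_order_py
  set g : Int → List (String × String) := fun i => PySem.List.pyGetD sources i [] with hg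
  by_cases hnil : sources = []
  · subst hnil
    have h0 : ∀ i : Int, ¬ (1 ≤ i ∧ i < 1) := fun i => by omega
    simp [pvVF, h0, PySem.List.pyRange]
  · rw [if_neg hnil]
    have h1 := loop1_invariant sources order []
    simp only [List.map_nil] at h1
    have hempty : (PySem.Set.empty : PySem.Set Int) = [] := rfl
    rw [hempty, h1]
    set S : PySem.Set Int := (order.filterMap (pvVF (sources.length : Int))).foldl PySem.Set.add [] with hS
    have hused : PySem.List.dedup (order.filterMap (pvVF (sources.length : Int))) = S := by
      rw [PySem.List.dedup_eq_ofList, PySem.Set.ofList_eq_foldl]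
    have h2 := PySem.List.foldl_append_if
      (fun p : Int × List (String × String) => !PySem.Set.contains S p.1)
      (fun p : Int × List (String × String) => p.2)
      (PySem.List.enumerate sources 0) (S.map g)
    simp only [Bool.not_eq_eq_eq_not, Bool.not_true] at h2
    rw [h2]
    have hco : ∀ i : Int, PySem.Set.contains (PySem.Set.ofList S) i = PySem.Set.contains S i := by
      intro i
      by_cases h : i ∈ S <;>
        simp [PySem.Set.contains, PySem.Set.mem_ofList, h]
    simp only [List.map_append, hused, hco]
    congr 1
    rw [PySem.List.enumerate_eq_map_pyRange sources []]
    rw [List.filter_map, List.map_map]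
    simp only [PySem.List.len, Function.comp_def, hg]

-- the first-mention dict: lookup is the (shifted) first index of x+1 in the enumerated suffix
theorem pos_get? (l : List Int) (j0 : Int) (d : PySem.Dict Int Int) (x : Int) :
    ((PySem.List.enumerate l j0).foldl
        (fun (d : PySem.Dict Int Int) p => d.setdefault (p.2 - 1) p.1) d).get? x
      = (d.get? x).or ((PySem.List.index? l (x + 1)).map (fun k : Nat => j0 + k)) := by
  induction l generalizing j0 d with
  | nil => simp [PySem.List.enumerate, PySem.List.index?]
  | cons a l ih =>
    have hen : PySem.List.enumerate (a :: l) j0 = (j0, a) :: PySem.List.enumerate l (j0 + 1) := rfl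
    rw [hen, List.foldl_cons, ih]
    by_cases hx : x = a - 1
    · have hax : a = x + 1 := by omega
      subst hax
      rw [PySem.List.index?_cons_self]
      have hd : (d.setdefault (x + 1 - 1) j0).get? x = some ((d.get? x).getD j0) := by
        have := PySem.Dict.get?_setdefault_self d (x + 1 - 1) j0
        simpa using this
      rw [hd]
      cases hget : d.get? x with
      | none => simp
      | some v => simp
    · have hne : a ≠ x + 1 := by omega
      rw [PySem.Dict.get?_setdefault_of_ne d j0 (by omega : x ≠ a - 1),
        PySem.List.index?_cons_of_ne l hne, Option.map_map]
      have hf : ((fun k : Nat => j0 + (k : Int)) ∘ fun x : Nat => x + 1)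
          = (fun k : Nat => j0 + 1 + (k : Int)) := by
        funext k
        simp only [Function.comp_apply]
        push_cast
        ring
      rw [hf]

-- deduped valid indices are strictly ordered by the rank of their first mention
theorem dedup_rank_pairwise (n : Int) (l : List Int) :
    (PySem.List.dedup (l.filterMap (pvVF n))).Pairwise
      (fun a b => pvRnk l (a + 1) < pvRnk l (b + 1)) := by
  induction l with
  | nil => simp [PySem.List.dedup, PySem.Set.ofList]
  | cons v l ih =>
    by_cases hc : 0 ≤ v - 1 ∧ v - 1 < n
    · have hfm : (v :: l).filterMap (pvVF n) = (v - 1) :: l.filterMap (pvVF n) := by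
        simp only [List.filterMap_cons, pvVF, if_pos hc]
      rw [hfm, PySem.List.dedup_eq_ofList, PySem.Set.ofList_cons]
      constructor
      · intro b hb
        rw [PySem.Set.mem_discard] at hb
        obtain ⟨_, hbne⟩ := hb
        have hvv : v - 1 + 1 = v := by omega
        rw [hvv, rnk_cons_self, rnk_cons_ne v (b + 1) l (fun h => hbne (by omega))]
        omega
      · have hp := List.Pairwise.sublist
          (List.filter_sublist (l := PySem.Set.ofList (l.filterMap (pvVF n)))
            (p := (· != (v - 1))))
          (by rw [← PySem.List.dedup_eq_ofList]; exact ih)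
        refine hp.imp_of_mem ?_
        intro a b ha hb hab
        have ha' : a ≠ v - 1 := ((PySem.Set.mem_discard _ _ _).mp ha).2
        have hb' : b ≠ v - 1 := ((PySem.Set.mem_discard _ _ _).mp hb).2
        rw [rnk_cons_ne v (a + 1) l (fun h => ha' (by omega)),
          rnk_cons_ne v (b + 1) l (fun h => hb' (by omega))]
        omega
    · have hfm : (v :: l).filterMap (pvVF n) = l.filterMap (pvVF n) := by
        simp only [List.filterMap_cons, pvVF, if_neg hc]
      rw [hfm]
      refine ih.imp_of_mem ?_
      intro a b ha hb hab
      have hva : v ≠ a + 1 := by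
        intro h
        have := ((mem_valid n l a).mp ((PySem.List.mem_dedup _ _).mp ha))
        exact hc ⟨by omega, by omega⟩
      have hvb : v ≠ b + 1 := by
        intro h
        have := ((mem_valid n l b).mp ((PySem.List.mem_dedup _ _).mp hb))
        exact hc ⟨by omega, by omega⟩
      rw [rnk_cons_ne v (a + 1) l hva, rnk_cons_ne v (b + 1) l hvb]
      omega

-- B in the same canonical form
theorem B_canon (sources : List (List (String × String))) (order : List Int) :
    apply_source_order_py_alt sources order =
      (PySem.List.dedup (order.filterMap (pvVF (sources.length : Int))) ++
        (PySem.List.pyRange 0 (sources.length : Int)).filter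
          (fun i => !PySem.Set.contains
            (PySem.Set.ofList (PySem.List.dedup (order.filterMap (pvVF (sources.length : Int))))) i)).map
        (fun i => PySem.List.pyGetD sources i []) := by
  unfold apply_source_order_py_alt
  have hlen : PySem.List.len sources = (sources.length : Int) := rfl
  have hlenO : PySem.List.len order = (order.length : Int) := rfl
  set n : Int := (sources.length : Int) with hn
  set S : List Int := PySem.List.dedup (order.filterMap (pvVF n)) with hS
  set R : List Int := (PySem.List.pyRange 0 n).filter
    (fun i => !PySem.Set.contains (PySem.Set.ofList S) i) with hR
  set pos : PySem.Dict Int Int := (PySem.List.enumerate order 0).foldl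
    (fun (d : PySem.Dict Int Int) p => d.setdefault (p.2 - 1) p.1) PySem.Dict.empty with hpos
  set key : Int → Int := fun i => pos.getD i (PySem.List.len order + i) with hkey
  have hget : ∀ x : Int, pos.get? x
      = (PySem.List.index? order (x + 1)).map (fun k : Nat => (k : Int)) := by
    intro x
    rw [hpos, pos_get? order 0 PySem.Dict.empty x, PySem.Dict.get?_empty]
    simp
  -- key on deduped valid indices: the rank of the first mention, below the length of order
  have hkeyS : ∀ a ∈ S, key a = (pvRnk order (a + 1) : Int) ∧ pvRnk order (a + 1) < order.length := by
    intro a haS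
    have hmem : a + 1 ∈ order :=
      ((mem_valid n order a).mp ((PySem.List.mem_dedup _ _).mp haS)).1
    obtain ⟨k, hk⟩ := Option.isSome_iff_exists.mp
      ((PySem.List.index?_isSome_iff order (a + 1)).mpr hmem)
    have hrnk : pvRnk order (a + 1) = k := by rw [pvRnk, hk]; rfl
    obtain ⟨hklt, -, -⟩ := PySem.List.getElem_of_index?_eq_some hk
    refine ⟨?_, by omega⟩
    have hsome : pos.get? a = some (k : Int) := by rw [hget a, hk]; rfl
    simp only [hkey]
    rw [PySem.Dict.getD_of_get?_eq_some pos _ hsome, hrnk]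
  -- key on the untouched range indices: past the end, in index order
  have hkeyR : ∀ b ∈ R, key b = (order.length : Int) + b ∧ 0 ≤ b ∧ b < n := by
    intro b hbR
    obtain ⟨hbrange, hbcond⟩ := List.mem_filter.mp hbR
    have hb01 : 0 ≤ b ∧ b < n := PySem.List.mem_pyRange_one.mp hbrange
    have hbS : b ∉ S := by
      intro hbS
      simp [PySem.Set.contains, PySem.Set.mem_ofList, hbS] at hbcond
    have hmem : b + 1 ∉ order := by
      intro hmem
      exact hbS ((PySem.List.mem_dedup _ _).mpr
        ((mem_valid n order b).mpr ⟨hmem, hb01.1, hb01.2⟩))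
    have hnone : pos.get? b = none := by
      rw [hget b, (PySem.List.index?_eq_none_iff order (b + 1)).mpr hmem]; rfl
    refine ⟨?_, hb01⟩
    simp only [hkey]
    rw [PySem.Dict.getD_of_get?_eq_none pos _ hnone, hlenO]
  have hrange : PySem.List.pyRange 0 n = (List.range sources.length).map (fun k : Nat => (k : Int)) :=
    PySem.List.pyRange_zero_natCast sources.length
  have hndR : (PySem.List.pyRange 0 n).Nodup := by
    rw [hrange]
    exact (List.nodup_range).map (fun a b h => by exact_mod_cast h)
  have hpwR : (PySem.List.pyRange 0 n).Pairwise (· < ·) := by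
    rw [hrange]
    exact List.Pairwise.map _ (fun a b h => by exact_mod_cast h) List.pairwise_lt_range
  -- S ++ R is a permutation of range(n)
  have hperm : (S ++ R).Perm (PySem.List.pyRange 0 n) := by
    rw [List.perm_ext_iff_of_nodup ?_ hndR]
    · intro x
      constructor
      · intro hx
        rcases List.mem_append.mp hx with hxS | hxR
        · have := (mem_valid n order x).mp ((PySem.List.mem_dedup _ _).mp hxS)
          exact PySem.List.mem_pyRange_one.mpr ⟨this.2.1, this.2.2⟩
        · exact (List.mem_filter.mp hxR).1
      · intro hx
        by_cases hxS : x ∈ S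
        · exact List.mem_append.mpr (Or.inl hxS)
        · refine List.mem_append.mpr (Or.inr (List.mem_filter.mpr ⟨hx, ?_⟩))
          simp [PySem.Set.contains, PySem.Set.mem_ofList, hxS]
    · rw [List.nodup_append]
      refine ⟨PySem.List.nodup_dedup _, hndR.filter _, ?_⟩
      intro a haS b hbR hab
      subst hab
      have : a ∉ S := by
        have hbcond := (List.mem_filter.mp hbR).2
        intro h
        simp [PySem.Set.contains, PySem.Set.mem_ofList, h] at hbcond
      exact this haS
  -- S ++ R is strictly increasing in the key
  have hpw : (S ++ R).Pairwise (fun a b => key a < key b) := by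
    rw [List.pairwise_append]
    refine ⟨?_, ?_, ?_⟩
    · refine (dedup_rank_pairwise n order).imp_of_mem ?_
      intro a b ha hb hba
      obtain ⟨hka, -⟩ := hkeyS a ha
      obtain ⟨hkb, -⟩ := hkeyS b hb
      rw [hka, hkb]
      exact_mod_cast hba
    · refine (hpwR.filter _).imp_of_mem ?_
      intro a b ha hb hba
      obtain ⟨hka, -, -⟩ := hkeyR a ha
      obtain ⟨hkb, -, -⟩ := hkeyR b hb
      rw [hka, hkb]
      omega
    · intro a ha b hb
      obtain ⟨hka, hlt⟩ := hkeyS a ha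
      obtain ⟨hkb, hb0, -⟩ := hkeyR b hb
      rw [hka, hkb]
      have : (pvRnk order (a + 1) : Int) < (order.length : Int) := by exact_mod_cast hlt
      omega
  have hsorted : PySem.List.sorted (PySem.List.pyRange 0 n) key = S ++ R :=
    PySem.List.sorted_eq_of_perm_of_pairwise_lt _ _ key hperm hpw
  show (PySem.List.sorted (PySem.List.pyRange 0 (PySem.List.len sources)) key).map
      (fun i => PySem.List.pyGetD sources i []) = _
  rw [hlen, hsorted]

-- ===== VERDICT (by name: the statement is the Claim_ definition above) =====
theorem apply_source_order_py_spec : Claim_equal_apply_source_order_py := by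
  intro sources order _
  unfold Spec_apply_source_order_py
  rw [A_canon, B_canon]
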